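-- pv_equiv track=rewrite | github.com/ManosXen/Routing-Aware-Federated-Fine-tuning-of-Mixture-of-Experts-LLMs | jetson_impl/fedavg_aggregation/fl_swap/partial_aggr_script_runner.py | compute_dataset_ranges
-- ===== SOURCE A (Python) =====
-- def compute_dataset_ranges(size_list):
--     ranges = []
--     start = 0
--     for sz in size_list:
--         if sz in (-1, None):
--             ranges.append((-1, -1))
--         else:
--             end = start + sz
--             ranges.append((start, end))
--             start = end
--     return ranges
-- ===== SOURCE B (Python) =====
-- def compute_dataset_ranges(size_list):
--     special = [sz in (-1, None) for sz in size_list]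
--     offsets = [0]
--     for sp, sz in zip(special, size_list):
--         offsets.append(offsets[-1] + (0 if sp else sz))
--     return [(-1, -1) if sp else bounds
--             for sp, bounds in zip(special, zip(offsets, offsets[1:]))]
-- ===== Notes on version B (the rewrite author's own statement) =====
-- stated objective: alternative
-- what changed: B replaces A's single running-start loop with an accumulate-then-pair decomposition: it first builds the cumulative offset boundaries (special entries contributing 0) and then zips consecutive boundaries into (start, end) pairs, substituting (-1, -1) at special entries.
import Mathlib
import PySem

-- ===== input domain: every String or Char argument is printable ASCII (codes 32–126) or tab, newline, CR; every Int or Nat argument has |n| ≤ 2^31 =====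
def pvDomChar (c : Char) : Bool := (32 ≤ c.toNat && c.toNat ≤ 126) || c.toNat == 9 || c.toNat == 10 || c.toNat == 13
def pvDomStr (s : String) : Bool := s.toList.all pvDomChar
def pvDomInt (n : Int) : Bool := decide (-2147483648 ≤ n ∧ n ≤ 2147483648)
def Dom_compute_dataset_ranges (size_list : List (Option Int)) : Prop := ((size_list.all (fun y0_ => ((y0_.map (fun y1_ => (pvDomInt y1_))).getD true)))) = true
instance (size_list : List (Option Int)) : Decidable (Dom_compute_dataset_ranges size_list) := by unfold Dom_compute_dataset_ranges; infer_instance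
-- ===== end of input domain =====

-- B computes the ranges by an accumulate-then-pair decomposition (cumulative offset
-- boundaries, then zip of consecutive boundaries) instead of A's single running-start loop.


-- ===== PORT A =====
-- `sz in (-1, None)` : true iff sz is None or sz == -1
def pvIsSpecial (sz : Option Int) : Bool :=
  match sz with
  | none => true
  | some v => v == -1

def compute_dataset_ranges (size_list : List (Option Int)) : List (Int × Int) :=
  (size_list.foldl
    (fun (st : List (Int × Int) × Int) sz =>
      if pvIsSpecial sz then
        (st.1 ++ [(-1, -1)], st.2)
      else
        (st.1 ++ [(st.2, st.2 + sz.getD 0)], st.2 + sz.getD 0))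
    ([], 0)).1

-- ===== PORT B =====
def compute_dataset_ranges_alt (size_list : List (Option Int)) : List (Int × Int) :=
  -- special = [sz in (-1, None) for sz in size_list]
  let special := size_list.map pvIsSpecial
  -- offsets = [0]; for sp, sz in zip(special, size_list): offsets.append(offsets[-1] + (0 if sp else sz))
  let offsets := (special.zip size_list).foldl
    (fun (os : List Int) p => os ++ [os.getLastD 0 + (if p.1 then 0 else p.2.getD 0)]) [0]
  -- [(-1,-1) if sp else bounds for sp, bounds in zip(special, zip(offsets, offsets[1:]))]
  (special.zip (offsets.zip (offsets.drop 1))).map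
    (fun p => if p.1 then (-1, -1) else p.2)

-- ===== PRECONDITION & SPEC =====
def Spec_compute_dataset_ranges (size_list : List (Option Int)) (out : List (Int × Int)) : Prop := out = compute_dataset_ranges_alt size_list
instance (size_list : List (Option Int)) (out : List (Int × Int)) : Decidable (Spec_compute_dataset_ranges size_list out) := by unfold Spec_compute_dataset_ranges; infer_instance

-- ===== CLAIM (what is proved, stated in full; the proofs are below) =====
def Claim_equal_compute_dataset_ranges : Prop := ∀ (size_list : List (Option Int)), Dom_compute_dataset_ranges size_list → Spec_compute_dataset_ranges size_list (compute_dataset_ranges size_list)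

-- ===== LEMMAS AND PROOFS =====

-- Clean recursion both ports are reduced to: ranges from start s.
def pvRanges (s : Int) : List (Option Int) → List (Int × Int)
  | [] => []
  | sz :: t =>
    if pvIsSpecial sz then (-1, -1) :: pvRanges s t
    else (s, s + sz.getD 0) :: pvRanges (s + sz.getD 0) t

lemma portA_eq_ranges (l : List (Option Int)) (acc : List (Int × Int)) (s : Int) :
    (l.foldl
      (fun (st : List (Int × Int) × Int) sz =>
        if pvIsSpecial sz then
          (st.1 ++ [(-1, -1)], st.2)
        else
          (st.1 ++ [(st.2, st.2 + sz.getD 0)], st.2 + sz.getD 0))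
      (acc, s)).1 = acc ++ pvRanges s l := by
  induction l generalizing acc s with
  | nil => simp [pvRanges]
  | cons sz t ih =>
    simp only [List.foldl_cons, pvRanges]
    by_cases h : pvIsSpecial sz = true <;> simp [h, ih]

-- The running-sums tail: offsets after the initial 0.
def pvScan (s : Int) : List (Bool × Option Int) → List Int
  | [] => []
  | p :: t => (s + (if p.1 then 0 else p.2.getD 0)) :: pvScan (s + (if p.1 then 0 else p.2.getD 0)) t

lemma offsets_eq_scan (cs : List (Bool × Option Int)) (os : List Int) (s : Int) (h : os.getLastD 0 = s) :
    cs.foldl (fun (os : List Int) p => os ++ [os.getLastD 0 + (if p.1 then 0 else p.2.getD 0)]) os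
      = os ++ pvScan s cs := by
  induction cs generalizing os s with
  | nil => simp [pvScan]
  | cons c t ih =>
    simp only [List.foldl_cons, pvScan, h]
    rw [ih (os ++ [s + (if c.1 then 0 else c.2.getD 0)]) (s + (if c.1 then 0 else c.2.getD 0)) (by simp)]
    simp

-- Pairing consecutive scan boundaries reproduces pvRanges.
lemma pair_scan (l : List (Option Int)) (s : Int) :
    ((l.map pvIsSpecial).zip
        ((s :: pvScan s ((l.map pvIsSpecial).zip l)).zip
          (pvScan s ((l.map pvIsSpecial).zip l)))).map
      (fun p => if p.1 then ((-1 : Int), (-1 : Int)) else p.2)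
    = pvRanges s l := by
  induction l generalizing s with
  | nil => simp [pvRanges, pvScan]
  | cons sz t ih =>
    simp only [List.map_cons, List.zip_cons_cons, pvScan, pvRanges]
    by_cases h : pvIsSpecial sz = true <;> simp only [h, if_true, ih] <;> simp

-- ===== VERDICT (by name: the statement is the Claim_ definition above) =====
theorem compute_dataset_ranges_spec : Claim_equal_compute_dataset_ranges := by
  intro l _
  show compute_dataset_ranges l = compute_dataset_ranges_alt l
  unfold compute_dataset_ranges compute_dataset_ranges_alt
  rw [portA_eq_ranges l [] 0]
  dsimp only
  rw [offsets_eq_scan _ [0] 0 (by simp)]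
  simp only [List.nil_append, List.cons_append, List.drop_succ_cons, List.drop_zero,
    List.nil_append]
  rw [pair_scan l 0]
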